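-- pv_equiv track=rewrite | github.com/rafqel/UFRJ | Comp-1-UFRJ/lista6rafaeljesus.py | questao5
-- ===== SOURCE A (Python) =====
-- def questao5(prodPreco,minhaLista):
--
--     if set(minhaLista.keys())-set(prodPreco.keys()) != set():
--         return -1
--
--     soma = 0
--     for produto in minhaLista:
--         preco = prodPreco[produto]
--         quantidade = minhaLista[produto]
--         soma = soma + preco*quantidade
--
--     return soma
-- ===== SOURCE B (Python) =====
-- def questao5(prodPreco, minhaLista):
--     # Inverted traversal: walk the price catalogue instead of the shopping list,
--     # accumulating the total and counting how many shopping items got priced;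
--     # the shopping list is fully covered iff the count equals its length.
--     total = 0
--     matched = 0
--     for produto, preco in prodPreco.items():
--         if produto in minhaLista:
--             total += preco * minhaLista[produto]
--             matched += 1
--     if matched == len(minhaLista):
--         return total
--     return -1
-- ===== Notes on version B (the rewrite author's own statement) =====
-- stated objective: alternative
-- what changed: B inverts the traversal: instead of A's set-difference validation over the shopping list followed by a summing loop over it, B makes one pass over the price catalogue, accumulating price*quantity for catalogue entries present in the shopping list and counting them, and returns -1 unless that count equals the shopping list's length (valid since dict keys are distinct, addition commutes).
import Mathlib
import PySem

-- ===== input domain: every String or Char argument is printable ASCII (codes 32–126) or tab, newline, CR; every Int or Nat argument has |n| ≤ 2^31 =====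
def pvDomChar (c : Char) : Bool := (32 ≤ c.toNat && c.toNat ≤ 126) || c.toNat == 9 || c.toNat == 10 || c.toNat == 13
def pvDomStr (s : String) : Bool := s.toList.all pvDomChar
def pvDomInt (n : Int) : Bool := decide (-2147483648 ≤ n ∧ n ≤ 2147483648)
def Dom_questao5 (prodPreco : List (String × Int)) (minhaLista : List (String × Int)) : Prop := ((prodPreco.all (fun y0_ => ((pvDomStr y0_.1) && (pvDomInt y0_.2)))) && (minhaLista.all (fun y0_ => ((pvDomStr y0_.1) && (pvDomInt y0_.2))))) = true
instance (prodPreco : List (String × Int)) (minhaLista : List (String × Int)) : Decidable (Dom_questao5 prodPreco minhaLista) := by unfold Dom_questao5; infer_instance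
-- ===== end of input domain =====

-- B inverts the traversal: one pass over the price catalogue counting matched shopping
-- items instead of A's set-difference guard plus a loop over the shopping list
-- (objective: alternative, same cost).

-- ===== PORT A =====
-- A: guard with set(minhaLista.keys()) - set(prodPreco.keys()) != set(), then a second
-- loop over the dict's keys summing prodPreco[produto] * minhaLista[produto].
def questao5 (prodPreco : List (String × Int)) (minhaLista : List (String × Int)) : Int :=
  let dp := PySem.Dict.ofList prodPreco
  let dm := PySem.Dict.ofList minhaLista
  -- set difference of the key sets (dict keys are already distinct)
  if dm.keys.filter (fun k => !(dp.contains k)) ≠ [] then -1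
  else dm.keys.foldl (fun soma produto =>
        soma + ((dp.get? produto).getD 0) * ((dm.get? produto).getD 0)) 0
  -- the guard guarantees both get? succeed, so .getD 0 is exact for prodPreco[produto] / minhaLista[produto]

-- ===== PORT B =====
-- B: one pass over prodPreco.items(), state (total, matched); 'minhaLista[produto]'
-- under the membership guard is exact as getD 0.
def questao5AltGo (dm : PySem.Dict String Int) :
    List (String × Int) → Int × Int → Int × Int
  | [], st => st
  | (produto, preco) :: rest, (total, matched) =>
      if dm.contains produto then
        questao5AltGo dm rest (total + preco * dm.getD produto 0, matched + 1)
      else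
        questao5AltGo dm rest (total, matched)

def questao5_alt (prodPreco : List (String × Int)) (minhaLista : List (String × Int)) : Int :=
  let dp := PySem.Dict.ofList prodPreco
  let dm := PySem.Dict.ofList minhaLista
  let st := questao5AltGo dm dp.items (0, 0)
  if st.2 = (dm.size : Int) then st.1 else -1

-- ===== PRECONDITION & SPEC =====
def Spec_questao5 (prodPreco : List (String × Int)) (minhaLista : List (String × Int)) (out : Int) : Prop := out = questao5_alt prodPreco minhaLista
instance (prodPreco : List (String × Int)) (minhaLista : List (String × Int)) (out : Int) : Decidable (Spec_questao5 prodPreco minhaLista out) := by unfold Spec_questao5; infer_instance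

-- ===== CLAIM =====
def Claim_equal_questao5 : Prop := ∀ (prodPreco : List (String × Int)) (minhaLista : List (String × Int)), Dom_questao5 prodPreco minhaLista → Spec_questao5 prodPreco minhaLista (questao5 prodPreco minhaLista)

-- ===== LEMMAS AND PROOFS =====

-- B's loop computed in closed form: total and matched over the filtered pair list.
theorem questao5AltGo_eq (dm : PySem.Dict String Int) :
    ∀ (l : List (String × Int)) (t m : Int),
      questao5AltGo dm l (t, m) =
        (t + ((l.filter (fun p => dm.contains p.1)).map
                (fun p => p.2 * dm.getD p.1 0)).sum,
         m + ((l.filter (fun p => dm.contains p.1)).length : Int)) := by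
  intro l
  induction l with
  | nil => intro t m; simp [questao5AltGo]
  | cons p rest ih =>
    intro t m
    obtain ⟨k, v⟩ := p
    by_cases hc : dm.contains k = true
    · simp only [questao5AltGo, hc, if_true, ih, List.filter_cons]
      simp only [List.map_cons, List.sum_cons, List.length_cons, Prod.mk.injEq]
      constructor <;> push_cast <;> ring
    · simp at hc
      simp [questao5AltGo, hc, ih]

theorem questao5_spec_aux (prodPreco minhaLista : List (String × Int)) :
    questao5 prodPreco minhaLista = questao5_alt prodPreco minhaLista := by
  unfold questao5 questao5_alt
  set dp := PySem.Dict.ofList prodPreco with hdp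
  set dm := PySem.Dict.ofList minhaLista with hdm
  have hnd_p : dp.keys.Nodup := PySem.Dict.nodup_keys_ofList prodPreco
  have hnd_m : dm.keys.Nodup := PySem.Dict.nodup_keys_ofList minhaLista
  -- rewrite B's pair-level filtered traversal to a key-level one
  have hitems : dp.items = dp.keys.map (fun k => (k, dp.getD k 0)) :=
    PySem.Dict.items_eq_map_keys dp hnd_p 0
  -- L = keys of the catalogue that occur in the shopping list
  set L := dp.keys.filter (fun k => dm.contains k) with hL
  have hfil : dp.items.filter (fun p => dm.contains p.1)
      = L.map (fun k => (k, dp.getD k 0)) := by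
    rw [hitems, List.filter_map]; rfl
  have hgo := questao5AltGo_eq dm dp.items 0 0
  rw [hfil] at hgo
  simp only [hgo, zero_add, List.map_map, List.length_map]
  have hLnd : L.Nodup := hnd_p.filter _
  have hmemL : ∀ k, k ∈ L ↔ k ∈ dp.keys ∧ k ∈ dm.keys := by
    intro k
    simp [hL, List.mem_filter, PySem.Dict.contains_iff_mem_keys]
  by_cases hbad : dm.keys.filter (fun k => !(dp.contains k)) ≠ []
  · -- some shopping key is missing from the catalogue: both return -1
    simp only [if_pos hbad]
    obtain ⟨k, hkm, hknp⟩ : ∃ k ∈ dm.keys, dp.contains k = false := by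
      rcases List.exists_mem_of_ne_nil _ hbad with ⟨k, hk⟩
      rcases List.mem_filter.mp hk with ⟨h1, h2⟩
      exact ⟨k, h1, by simpa using h2⟩
    have hknotL : k ∉ L := by
      intro hkL
      have := (hmemL k).mp hkL
      rw [← PySem.Dict.contains_iff_mem_keys] at this
      exact absurd this.1 (by simp [hknp])
    have hsub : L ⊆ dm.keys.erase k := by
      intro j hj
      have hj' := (hmemL j).mp hj
      have hjk : j ≠ k := fun h => hknotL (h ▸ hj)
      exact (List.mem_erase_of_ne hjk).mpr hj'.2
    have hlt : L.length < dm.keys.length := by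
      have h1 : L.length ≤ (dm.keys.erase k).length :=
        (List.subperm_of_subset hLnd hsub).length_le
      have h2 : (dm.keys.erase k).length = dm.keys.length - 1 :=
        List.length_erase_of_mem hkm
      have h3 : 0 < dm.keys.length := List.length_pos_of_mem hkm
      omega
    have hne : ((L.length : Int)) ≠ (dm.size : Int) := by
      have : dm.size = dm.keys.length := by
        simp [PySem.Dict.size, PySem.Dict.keys]
      omega
    simp [hne]
  · -- every shopping key is in the catalogue: L is a permutation of dm.keys
    simp only [if_neg hbad]
    push Not at hbad
    have hcov : ∀ k ∈ dm.keys, dp.contains k = true := by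
      intro k hk
      by_contra h
      have : k ∈ dm.keys.filter (fun k => !(dp.contains k)) := by
        simp [List.mem_filter, hk]
        simpa using h
      simp [hbad] at this
    have hmemL' : ∀ k, k ∈ L ↔ k ∈ dm.keys := by
      intro k
      rw [hmemL]
      constructor
      · exact fun h => h.2
      · intro h
        refine ⟨?_, h⟩
        rw [← PySem.Dict.contains_iff_mem_keys]
        exact hcov k h
    have hperm : L.Perm dm.keys :=
      (List.perm_ext_iff_of_nodup hLnd hnd_m).mpr hmemL'
    have hlen : ((L.length : Int)) = (dm.size : Int) := by
      have : dm.size = dm.keys.length := by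
        simp [PySem.Dict.size, PySem.Dict.keys]
      rw [this, hperm.length_eq]
    -- the two sums range over permuted key lists with equal terms
    have hsum :
        (L.map (fun k => dp.getD k 0 * dm.getD k 0)).sum
          = (dm.keys.map (fun k => dp.getD k 0 * dm.getD k 0)).sum :=
      (hperm.map _).sum_eq
    have hterm : (L.map ((fun p => p.2 * dm.getD p.1 0) ∘ fun k => (k, dp.getD k 0)))
        = L.map (fun k => dp.getD k 0 * dm.getD k 0) := by
      simp [Function.comp]
    have hA : (dm.keys.map (fun produto => (dp.get? produto).getD 0 * (dm.get? produto).getD 0))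
        = dm.keys.map (fun k => dp.getD k 0 * dm.getD k 0) := by
      apply List.map_congr_left
      intro k _
      simp [PySem.Dict.getD_eq_get?_getD]
    rw [if_pos hlen, PySem.List.foldl_add, zero_add, hA, ← hsum, hterm]

-- ===== VERDICT =====
theorem questao5_spec : Claim_equal_questao5 := by
  intro prodPreco minhaLista _
  exact questao5_spec_aux prodPreco minhaLista
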